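-- pv_equiv track=rewrite | github.com/introduce131/place-crawling | app.py | _extract_array_after_pos
-- ===== SOURCE A (Python) =====
-- def _extract_array_after_pos(html: str, pos: int) -> str | None:
--     br = html.find('[', pos)
--     if br == -1:
--         return None
--     depth = 0
--     in_str = False
--     esc = False
--     for i in range(br, len(html)):
--         ch = html[i]
--         if in_str:
--             if esc:
--                 esc = False
--             elif ch == '\\':
--                 esc = True
--             elif ch == '"':
--                 in_str = False
--             continue
--         else:
--             if ch == '"':
--                 in_str = True
--                 continue
--             if ch == '[':
--                 depth += 1
--             elif ch == ']':
--                 depth -= 1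
--                 if depth == 0:
--                     return html[br:i+1]
--     return None
-- ===== SOURCE B (Python) =====
-- def _parse(html, i):
--     # assumes html[i] == '['; returns index of the matching ']' or None,
--     # skipping nested arrays by recursion and "..." strings (with \ escapes)
--     j = i + 1
--     in_str = False
--     esc = False
--     while j < len(html):
--         ch = html[j]
--         if in_str:
--             if esc:
--                 esc = False
--             elif ch == '\\':
--                 esc = True
--             elif ch == '"':
--                 in_str = False
--             j += 1
--         elif ch == '"':
--             in_str = True
--             j += 1
--         elif ch == '[':
--             k = _parse(html, j)
--             if k is None:
--                 return None
--             j = k + 1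
--         elif ch == ']':
--             return j
--         else:
--             j += 1
--     return None
--
--
-- def _extract_array_after_pos(html: str, pos: int) -> str | None:
--     br = html.find('[', pos)
--     if br == -1:
--         return None
--     end = _parse(html, br)
--     return html[br:end + 1] if end is not None else None
-- ===== Notes on version B (the rewrite author's own statement) =====
-- stated objective: alternative
-- what changed: A's flat depth-counter scan is replaced by a recursive-descent parser: a helper that scans past one balanced array, recursing into each nested '[' to skip the inner array, with the same in-string/escape tracking; same single left-to-right scan cost.
import Mathlib
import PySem

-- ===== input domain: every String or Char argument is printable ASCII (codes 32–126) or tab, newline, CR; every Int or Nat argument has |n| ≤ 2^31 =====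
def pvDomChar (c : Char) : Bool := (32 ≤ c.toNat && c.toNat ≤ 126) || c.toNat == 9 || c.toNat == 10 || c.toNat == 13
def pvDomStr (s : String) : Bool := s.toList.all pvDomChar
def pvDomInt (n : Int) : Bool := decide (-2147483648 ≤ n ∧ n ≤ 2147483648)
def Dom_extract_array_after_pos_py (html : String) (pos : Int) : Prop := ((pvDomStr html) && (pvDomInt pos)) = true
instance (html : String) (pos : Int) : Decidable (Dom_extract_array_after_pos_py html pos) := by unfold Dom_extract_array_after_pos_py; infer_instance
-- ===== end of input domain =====

-- B replaces A's explicit depth counter by a recursive helper that recurses over the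
-- nested-bracket structure (alternative decomposition; same single left-to-right scan cost).

-- ===== PORT A =====
-- A's for-loop over i in range(br, len(html)) carrying (depth, in_str, esc); n counts the
-- characters already consumed since br, and success returns the length of html[br:i+1].
def pvALoop : List Char → Int → Bool → Bool → Nat → Option Nat
  | [], _, _, _, _ => none
  | ch :: rest, depth, in_str, esc, n =>
    if in_str then
      if esc then pvALoop rest depth in_str false (n+1)
      else if ch = '\\' then pvALoop rest depth in_str true (n+1)
      else if ch = '"' then pvALoop rest depth false esc (n+1)
      else pvALoop rest depth in_str esc (n+1)
    else
      if ch = '"' then pvALoop rest depth true esc (n+1)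
      else if ch = '[' then pvALoop rest (depth+1) in_str esc (n+1)
      else if ch = ']' then
        if depth - 1 = 0 then some (n+1) else pvALoop rest (depth-1) in_str esc (n+1)
      else pvALoop rest depth in_str esc (n+1)

def extract_array_after_pos_py (html : String) (pos : Int) : Option String :=
  let br := PySem.Str.findFrom html "[" pos
  if br = -1 then none
  else
    match pvALoop (html.toList.drop br.toNat) 0 false false 0 with
    | some len => some (String.ofList ((html.toList.drop br.toNat).take len))  -- html[br:i+1]
    | none => none

-- ===== PORT B =====
-- B's recursive parse: scans the characters AFTER a '[' and returns the offset of the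
-- matching ']' in that list (recursing to skip a nested array), or none.
def pvBScan : List Char → Bool → Bool → Option Nat
  | [], _, _ => none
  | ch :: rest, in_str, esc =>
    if in_str then
      if esc then (pvBScan rest in_str false).map (· + 1)
      else if ch = '\\' then (pvBScan rest in_str true).map (· + 1)
      else if ch = '"' then (pvBScan rest false esc).map (· + 1)
      else (pvBScan rest in_str esc).map (· + 1)
    else if ch = '"' then (pvBScan rest true esc).map (· + 1)
    else if ch = '[' then
      match pvBScan rest false false with   -- recurse into the nested array
      | none => none
      | some m => (pvBScan (rest.drop (m+1)) in_str esc).map (· + 1 + (m+1))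
    else if ch = ']' then some 0
    else (pvBScan rest in_str esc).map (· + 1)
  termination_by rest _ _ => rest.length
  decreasing_by all_goals (simp [List.length_drop]; try omega)

def extract_array_after_pos_py_alt (html : String) (pos : Int) : Option String :=
  let br := PySem.Str.findFrom html "[" pos
  if br = -1 then none
  else
    match pvBScan ((html.toList.drop br.toNat).drop 1) false false with
    | some m => some (String.ofList ((html.toList.drop br.toNat).take (m+2)))  -- html[br:end+1]
    | none => none

-- ===== PRECONDITION & SPEC =====
def Spec_extract_array_after_pos_py (html : String) (pos : Int) (out : Option String) : Prop := out = extract_array_after_pos_py_alt html pos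
instance (html : String) (pos : Int) (out : Option String) : Decidable (Spec_extract_array_after_pos_py html pos out) := by unfold Spec_extract_array_after_pos_py; infer_instance

-- ===== CLAIM (what is proved, stated in full; the proofs are below) =====
def Claim_equal_extract_array_after_pos_py : Prop := ∀ (html : String) (pos : Int), Dom_extract_array_after_pos_py html pos → Spec_extract_array_after_pos_py html pos (extract_array_after_pos_py html pos)

-- ===== LEMMAS AND PROOFS =====

theorem pvFindCore (s sub : List Char) (st : Int) (hst0 : 0 ≤ st) :
    sub <+: List.drop (st + PySem.Chars.find (List.drop st.toNat (List.take ((s.length:Int)).toNat s)) sub).toNat s ∨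
    PySem.Chars.find (List.drop st.toNat (List.take ((s.length:Int)).toNat s)) sub = -1 := by
  have htake : List.take ((s.length : Int)).toNat s = s := by simp
  rw [htake]
  set r := PySem.Chars.find (List.drop st.toNat s) sub with hr
  by_cases hr1 : r = -1
  · exact Or.inr hr1
  · left
    have hr0 : 0 ≤ r := by
      have := PySem.Chars.neg_one_le_find (List.drop st.toNat s) sub
      omega
    have hspec := (PySem.Chars.find_spec (s := List.drop st.toNat s) (sub := sub) hr0).1
    rw [List.drop_drop] at hspec
    have hx : (st + r).toNat = st.toNat + r.toNat := by omega
    rw [hx]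
    simpa [← hr] using hspec

theorem pvFindFrom_prefix (s sub : List Char) (pos : Int)
    (h : PySem.Chars.findFrom s sub pos ≠ -1) :
    sub <+: s.drop (PySem.Chars.findFrom s sub pos).toNat := by
  simp only [PySem.Chars.findFrom] at h ⊢
  split_ifs at h ⊢ <;>
    first
      | exact absurd rfl h
      | { rename_i hfind
          first
            | exact (pvFindCore s sub 0 (by omega)).resolve_right hfind
            | exact (pvFindCore s sub (pos + s.length) (by omega)).resolve_right hfind
            | exact (pvFindCore s sub pos (by omega)).resolve_right hfind }

-- shift helper: one non-bracket character consumed on both sides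
theorem pvShift (c : Char) (t : List Char) (i' e' : Bool) (d : Int) (n : Nat)
    (IH : pvALoop t d i' e' (n+1) = match pvBScan t i' e' with
      | none => none
      | some m => if d = 1 then some (n+1+m+1) else pvALoop (t.drop (m+1)) (d-1) false false (n+1+m+1)) :
    pvALoop t d i' e' (n+1) = match (pvBScan t i' e').map (· + 1) with
      | none => none
      | some m => if d = 1 then some (n+m+1) else pvALoop ((c::t).drop (m+1)) (d-1) false false (n+m+1) := by
  cases hb : pvBScan t i' e' with
  | none => simpa [hb] using IH
  | some x =>
    rw [hb] at IH
    simp only [Option.map_some, List.drop_succ_cons]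
    have h1 : n + (x+1) + 1 = n + 1 + x + 1 := by omega
    rw [h1]
    exact IH

theorem pvALoop_eq_bScan : ∀ (N : Nat) (rest : List Char), rest.length ≤ N →
    ∀ (in_str esc : Bool) (d : Int) (n : Nat), (in_str = true ∨ esc = false) → 1 ≤ d →
    pvALoop rest d in_str esc n =
      match pvBScan rest in_str esc with
      | none => none
      | some m => if d = 1 then some (n + m + 1)
                  else pvALoop (rest.drop (m+1)) (d-1) false false (n + m + 1) := by
  intro N
  induction N with
  | zero =>
    intro rest hlen
    have : rest = [] := List.eq_nil_of_length_eq_zero (by omega)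
    subst this
    intro _ _ _ _ _ _
    simp [pvALoop, pvBScan]
  | succ N ih =>
    intro rest hlen in_str esc d n hinv hd
    cases rest with
    | nil => simp [pvALoop, pvBScan]
    | cons ch t =>
      have ht : t.length ≤ N := by simpa using hlen
      cases in_str with
      | true =>
        cases esc with
        | true =>
          have hA : pvALoop (ch::t) d true true n = pvALoop t d true false (n+1) := by
            simp [pvALoop]
          have hB : pvBScan (ch::t) true true = (pvBScan t true false).map (· + 1) := by
            simp [pvBScan]
          rw [hA, hB]
          exact pvShift ch t true false d n (ih t ht true false d (n+1) (Or.inl rfl) hd)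
        | false =>
          by_cases hbs : ch = '\\'
          · have hA : pvALoop (ch::t) d true false n = pvALoop t d true true (n+1) := by
              simp [pvALoop, hbs]
            have hB : pvBScan (ch::t) true false = (pvBScan t true true).map (· + 1) := by
              simp [pvBScan, hbs]
            rw [hA, hB]
            exact pvShift ch t true true d n (ih t ht true true d (n+1) (Or.inl rfl) hd)
          · by_cases hq : ch = '"'
            · have hA : pvALoop (ch::t) d true false n = pvALoop t d false false (n+1) := by
                simp [pvALoop, hq]
              have hB : pvBScan (ch::t) true false = (pvBScan t false false).map (· + 1) := by
                simp [pvBScan, hq]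
              rw [hA, hB]
              exact pvShift ch t false false d n (ih t ht false false d (n+1) (Or.inr rfl) hd)
            · have hA : pvALoop (ch::t) d true false n = pvALoop t d true false (n+1) := by
                simp [pvALoop, hbs, hq]
              have hB : pvBScan (ch::t) true false = (pvBScan t true false).map (· + 1) := by
                simp [pvBScan, hbs, hq]
              rw [hA, hB]
              exact pvShift ch t true false d n (ih t ht true false d (n+1) (Or.inl rfl) hd)
      | false =>
        have hesc : esc = false := hinv.resolve_left (by simp)
        subst hesc
        by_cases hq : ch = '"'
        · have hA : pvALoop (ch::t) d false false n = pvALoop t d true false (n+1) := by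
            simp [pvALoop, hq]
          have hB : pvBScan (ch::t) false false = (pvBScan t true false).map (· + 1) := by
            simp [pvBScan, hq]
          rw [hA, hB]
          exact pvShift ch t true false d n (ih t ht true false d (n+1) (Or.inl rfl) hd)
        · by_cases hob : ch = '['
          · -- nested array: ih at depth d+1, then ih again on the tail after the inner match
            have hA : pvALoop (ch::t) d false false n = pvALoop t (d+1) false false (n+1) := by
              simp [pvALoop, hob]
            have hB : pvBScan (ch::t) false false =
                match pvBScan t false false with
                | none => none
                | some m => (pvBScan (t.drop (m+1)) false false).map (· + 1 + (m+1)) := by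
              simp [pvBScan, hob]
            rw [hA, hB]
            rw [ih t ht false false (d+1) (n+1) (Or.inr rfl) (by omega)]
            cases hb1 : pvBScan t false false with
            | none => simp
            | some m' =>
              simp only [if_neg (by omega : ¬ (d+1=1))]
              have hdd : d + 1 - 1 = d := by omega
              rw [hdd]
              rw [ih (t.drop (m'+1)) (le_trans (by simp) ht) false false d (n+1+m'+1) (Or.inr rfl) hd]
              cases hb2 : pvBScan (t.drop (m'+1)) false false with
              | none => simp
              | some x =>
                simp only [Option.map_some]
                have e1 : n + 1 + m' + 1 + x + 1 = n + (x + 1 + (m' + 1)) + 1 := by omega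
                by_cases hd1 : d = 1
                · simp only [hd1, if_true, e1]
                · simp only [if_neg hd1]
                  rw [List.drop_drop, List.drop_succ_cons, e1]
                  have e2 : m' + 1 + (x + 1) = x + 1 + (m' + 1) := by omega
                  rw [e2]
          · by_cases hcb : ch = ']'
            · have hA : pvALoop (ch::t) d false false n =
                  (if d - 1 = 0 then some (n+1) else pvALoop t (d-1) false false (n+1)) := by
                simp [pvALoop, hcb]
              have hB : pvBScan (ch::t) false false = some 0 := by
                simp [pvBScan, hcb]
              rw [hA, hB]
              by_cases hd1 : d = 1
              · simp [hd1]
              · have : ¬ (d - 1 = 0) := by omega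
                simp [this, hd1]
            · have hA : pvALoop (ch::t) d false false n = pvALoop t d false false (n+1) := by
                simp [pvALoop, hq, hob, hcb]
              have hB : pvBScan (ch::t) false false = (pvBScan t false false).map (· + 1) := by
                simp [pvBScan, hq, hob, hcb]
              rw [hA, hB]
              exact pvShift ch t false false d n (ih t ht false false d (n+1) (Or.inr rfl) hd)

-- ===== VERDICT (by name: the statement is the Claim_ definition above) =====
theorem extract_array_after_pos_py_spec : Claim_equal_extract_array_after_pos_py := by
  intro html pos _
  unfold Spec_extract_array_after_pos_py
  unfold extract_array_after_pos_py extract_array_after_pos_py_alt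
  by_cases hbr : PySem.Str.findFrom html "[" pos = -1
  · simp only [hbr]
    simp
  · simp only [hbr]
    have hpre := pvFindFrom_prefix html.toList "[".toList pos
      (by rw [← PySem.Str.findFrom_eq]; exact hbr)
    rw [← PySem.Str.findFrom_eq] at hpre
    obtain ⟨rest, hrest⟩ : ∃ rest,
        html.toList.drop (PySem.Str.findFrom html "[" pos).toNat = '[' :: rest := by
      obtain ⟨ts, hts⟩ := hpre
      exact ⟨ts, hts.symm⟩
    rw [hrest]
    have hstep : pvALoop ('[' :: rest) 0 false false 0 = pvALoop rest 1 false false 1 := by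
      simp [pvALoop]
    rw [hstep,
      pvALoop_eq_bScan rest.length rest le_rfl false false 1 1 (Or.inr rfl) le_rfl]
    rw [List.drop_succ_cons, List.drop_zero]
    cases hb : pvBScan rest false false with
    | none => simp
    | some m =>
      have h2 : 1 + m + 1 = m + 2 := by omega
      simp [h2]
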